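-- pv_equiv track=rewrite | github.com/kntjspr/symplot | calc_visualizer.py | get_display_function_string
-- ===== SOURCE A (Python) =====
-- def get_display_function_string(func_str):
--     """Convert function string to a more readable display format with proper LaTeX-like notation."""
--     # Replace basic operations
--     display_str = func_str.replace('**', '^').replace('*', '×')
--
--     # Replace mathematical constants with proper symbols
--     display_str = display_str.replace('pi', 'π')
--
--     # Handle e as a special case (to avoid replacing e in variable names)
--     parts = []
--     i = 0
--     while i < len(display_str):
--         if display_str[i] == 'e' and (i == 0 or not display_str[i-1].isalnum()) and (i == len(display_str)-1 or not display_str[i+1].isalnum()):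
--             parts.append('e')  # Euler's number as standalone 'e'
--             i += 1
--         elif i+3 <= len(display_str) and display_str[i:i+3] == 'exp':
--             parts.append('e^')  # Replace exp with e^
--             i += 3
--             # Skip the opening parenthesis
--             if i < len(display_str) and display_str[i] == '(':
--                 i += 1
--         else:
--             parts.append(display_str[i])
--             i += 1
--
--     return ''.join(parts)
-- ===== SOURCE B (Python) =====
-- def get_display_function_string(func_str):
--     display_str = func_str.replace('**', '^').replace('*', '×').replace('pi', 'π')
--     # The manual scanner's standalone-'e' branch is a no-op; the loop just rewrites
--     # 'exp(' (paren swallowed) and bare 'exp' to 'e^', left to right.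
--     return display_str.replace('exp(', 'e^').replace('exp', 'e^')
-- ===== Notes on version B (the rewrite author's own statement) =====
-- stated objective: simpler
-- what changed: The char-by-char index loop (with its dead standalone-'e' branch) is replaced by two library substring passes: replace 'exp(' with 'e^' first, then the remaining 'exp' occurrences.
import Mathlib
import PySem

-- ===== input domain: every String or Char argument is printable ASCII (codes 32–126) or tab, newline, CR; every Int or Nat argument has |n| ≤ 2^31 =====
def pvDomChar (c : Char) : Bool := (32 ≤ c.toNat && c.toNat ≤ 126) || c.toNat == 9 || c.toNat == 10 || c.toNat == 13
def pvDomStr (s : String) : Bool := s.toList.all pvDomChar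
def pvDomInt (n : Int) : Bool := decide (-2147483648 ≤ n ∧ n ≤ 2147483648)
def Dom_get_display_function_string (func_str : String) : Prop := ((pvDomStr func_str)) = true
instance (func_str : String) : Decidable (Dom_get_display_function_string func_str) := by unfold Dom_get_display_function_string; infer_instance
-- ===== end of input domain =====

-- B simplifies A: the scanner's standalone-'e' branch is a no-op, so the whole
-- char-by-char loop is just two substring replaces ('exp(' then 'exp' → 'e^').

-- ===== PORT A =====
-- the while loop of A: index i over s, accumulating `parts` (list of appended pieces)
def pvLoopA (s : List Char) (i : Nat) (parts : List (List Char)) : List (List Char) :=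
  if _h : i < s.length then
    if s.getD i ' ' = 'e' ∧ (i = 0 ∨ PySem.Chars.isalnum (s.getD (i-1) ' ') = false)
         ∧ (i = s.length - 1 ∨ PySem.Chars.isalnum (s.getD (i+1) ' ') = false) then
      pvLoopA s (i+1) (parts ++ [['e']])
    else if i + 3 ≤ s.length ∧ (s.drop i).take 3 = ['e','x','p'] then
      -- display_str[i:i+3] == 'exp' : the slice with 0 ≤ i is exactly take 3 ∘ drop i
      if i + 3 < s.length ∧ s.getD (i+3) ' ' = '(' then
        pvLoopA s (i+4) (parts ++ [['e','^']])
      else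
        pvLoopA s (i+3) (parts ++ [['e','^']])
    else
      pvLoopA s (i+1) (parts ++ [[s.getD i ' ']])
  else parts
termination_by s.length - i
decreasing_by all_goals omega

def get_display_function_string (func_str : String) : String :=
  let display_str := PySem.Str.replace (PySem.Str.replace func_str "**" "^") "*" "×"
  let display_str := PySem.Str.replace display_str "pi" "π"
  String.ofList ((pvLoopA display_str.toList 0 []).flatten)   -- ''.join(parts)

-- ===== PORT B =====
def get_display_function_string_alt (func_str : String) : String :=
  let display_str := PySem.Str.replace (PySem.Str.replace func_str "**" "^") "*" "×"
  let display_str := PySem.Str.replace display_str "pi" "π"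
  PySem.Str.replace (PySem.Str.replace display_str "exp(" "e^") "exp" "e^"

-- ===== PRECONDITION & SPEC =====
def Spec_get_display_function_string (func_str : String) (out : String) : Prop := out = get_display_function_string_alt func_str
instance (func_str : String) (out : String) : Decidable (Spec_get_display_function_string func_str out) := by unfold Spec_get_display_function_string; infer_instance

-- ===== CLAIM (what is proved, stated in full; the proofs are below) =====
def Claim_equal_get_display_function_string : Prop := ∀ (func_str : String), Dom_get_display_function_string func_str → Spec_get_display_function_string func_str (get_display_function_string func_str)

-- ===== LEMMAS AND PROOFS =====

-- fuel-free form of Chars.replace "exp(" → "e^"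
def pvRepP : List Char → List Char
  | [] => []
  | c :: t =>
    if ['e','x','p','('].isPrefixOf (c :: t) then 'e' :: '^' :: pvRepP (t.drop 3)
    else c :: pvRepP t
termination_by l => l.length
decreasing_by all_goals (simp only [List.length_cons, List.length_drop]; omega)

-- fuel-free form of Chars.replace "exp" → "e^"
def pvRepE : List Char → List Char
  | [] => []
  | c :: t =>
    if ['e','x','p'].isPrefixOf (c :: t) then 'e' :: '^' :: pvRepE (t.drop 2)
    else c :: pvRepE t
termination_by l => l.length
decreasing_by all_goals (simp only [List.length_cons, List.length_drop]; omega)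

theorem pvGoP (fuel : Nat) : ∀ (l acc : List Char), l.length ≤ fuel →
    PySem.Chars.replace.go ['e','x','p','('] ['e','^'] fuel l acc = acc.reverse ++ pvRepP l := by
  induction fuel with
  | zero =>
    intro l acc h
    cases l with
    | nil => simp [PySem.Chars.replace.go, pvRepP]
    | cons c t => simp at h
  | succ n ih =>
    intro l acc h
    match l with
    | [] => simp [PySem.Chars.replace.go, pvRepP]
    | c :: t =>
      rw [PySem.Chars.replace.go, pvRepP]
      by_cases hp : ['e','x','p','('].isPrefixOf (c :: t)
      · simp only [hp, if_true]
        rw [ih]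
        · simp
        · have := t.length_drop (i := 3); simp at h ⊢; omega
      · simp only [hp, if_false, Bool.false_eq_true]
        rw [ih]
        · simp
        · simp at h ⊢; omega

theorem pvGoE (fuel : Nat) : ∀ (l acc : List Char), l.length ≤ fuel →
    PySem.Chars.replace.go ['e','x','p'] ['e','^'] fuel l acc = acc.reverse ++ pvRepE l := by
  induction fuel with
  | zero =>
    intro l acc h
    cases l with
    | nil => simp [PySem.Chars.replace.go, pvRepE]
    | cons c t => simp at h
  | succ n ih =>
    intro l acc h
    match l with
    | [] => simp [PySem.Chars.replace.go, pvRepE]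
    | c :: t =>
      rw [PySem.Chars.replace.go, pvRepE]
      by_cases hp : ['e','x','p'].isPrefixOf (c :: t)
      · simp only [hp, if_true]
        rw [ih]
        · simp
        · simp at h ⊢; omega
      · simp only [hp, if_false, Bool.false_eq_true]
        rw [ih]
        · simp
        · simp at h ⊢; omega

theorem pvReplaceP (l : List Char) :
    PySem.Chars.replace l ['e','x','p','('] ['e','^'] = pvRepP l := by
  rw [PySem.Chars.replace]
  simpa using pvGoP l.length l [] le_rfl

theorem pvReplaceE (l : List Char) :
    PySem.Chars.replace l ['e','x','p'] ['e','^'] = pvRepE l := by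
  rw [PySem.Chars.replace]
  simpa using pvGoE l.length l [] le_rfl

-- repE steps over the two emitted chars 'e','^'
theorem pvRepE_e_caret (xs : List Char) : pvRepE ('e' :: '^' :: xs) = 'e' :: '^' :: pvRepE xs := by
  rw [pvRepE]; simp [List.isPrefixOf]
  rw [pvRepE]; simp [List.isPrefixOf]

-- if repP l starts with "exp" then l already did
theorem pvRepP_prefix (l : List Char) (h : ['e','x','p'] <+: pvRepP l) :
    ['e','x','p'] <+: l := by
  match l with
  | [] => simp [pvRepP] at h
  | c :: t =>
    rw [pvRepP] at h
    by_cases hp : ['e','x','p','('].isPrefixOf (c :: t)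
    · simp only [hp, if_true] at h
      simp [List.cons_prefix_cons] at h
    · simp only [hp, if_false, Bool.false_eq_true] at h
      simp only [List.cons_prefix_cons] at h ⊢
      obtain ⟨hc, h⟩ := h
      refine ⟨hc, ?_⟩
      match t with
      | [] => simp [pvRepP] at h
      | d :: u =>
        rw [pvRepP] at h
        by_cases hq : ['e','x','p','('].isPrefixOf (d :: u)
        · simp only [hq, if_true] at h
          simp [List.cons_prefix_cons] at h
        · simp only [hq, if_false, Bool.false_eq_true] at h
          simp only [List.cons_prefix_cons] at h ⊢
          obtain ⟨hd, h⟩ := h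
          refine ⟨hd, ?_⟩
          match u with
          | [] => simp [pvRepP] at h
          | f :: v =>
            rw [pvRepP] at h
            by_cases hr : ['e','x','p','('].isPrefixOf (f :: v)
            · simp only [hr, if_true] at h
              simp [List.cons_prefix_cons] at h
            · simp only [hr, if_false, Bool.false_eq_true] at h
              simp only [List.cons_prefix_cons] at h ⊢
              exact ⟨h.1, by simp⟩

-- decomposing the suffix s.drop i
theorem pvDropCons (s : List Char) (i : Nat) (h : i < s.length) :
    s.drop i = s.getD i ' ' :: s.drop (i+1) := by
  rw [List.drop_eq_getElem_cons h, List.getD_eq_getElem s ' ' h]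

theorem pvExpIff (s : List Char) (i : Nat) :
    (i + 3 ≤ s.length ∧ (s.drop i).take 3 = ['e','x','p']) ↔ ['e','x','p'] <+: s.drop i := by
  constructor
  · rintro ⟨-, h⟩
    exact ⟨(s.drop i).drop 3, by rw [← h, List.take_append_drop]⟩
  · rintro ⟨rest, hrest⟩
    have hlen := congrArg List.length hrest
    simp only [List.length_append, List.length_drop, List.length_cons, List.length_nil] at hlen
    refine ⟨by omega, ?_⟩
    rw [← hrest]
    simp

theorem pvParenIff (s : List Char) (i : Nat) (hexp : ['e','x','p'] <+: s.drop i) :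
    (i + 3 < s.length ∧ s.getD (i+3) ' ' = '(') ↔ ['e','x','p','('] <+: s.drop i := by
  obtain ⟨rest, hrest⟩ := hexp
  have hdrop : s.drop (i+3) = rest := by
    have h' := congrArg (List.drop 3) hrest
    simpa [List.drop_drop, Nat.add_comm] using h'.symm
  have hlen := congrArg List.length hrest
  simp only [List.length_append, List.length_drop, List.length_cons, List.length_nil] at hlen
  constructor
  · rintro ⟨hlt, hc⟩
    rw [pvDropCons s (i+3) hlt, hc] at hdrop
    rw [← hrest, ← hdrop]
    exact ⟨s.drop (i+3+1), by simp⟩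
  · rintro ⟨rest2, hrest2⟩
    have hr : rest = '(' :: rest2 := by
      have h'' := hrest.trans hrest2.symm
      simpa using h''
    have hlt : i + 3 < s.length := by rw [hr] at hlen; simp at hlen; omega
    rw [pvDropCons s (i+3) hlt, hr] at hdrop
    exact ⟨hlt, (List.cons_eq_cons.mp hdrop).1⟩

-- no "exp(" at the head: repP peels one char
theorem pvRepP_cons (c : Char) (t : List Char) (h : ¬ (['e','x','p','('] <+: (c :: t))) :
    pvRepP (c :: t) = c :: pvRepP t := by
  rw [pvRepP, if_neg (by simpa [List.isPrefixOf_iff_prefix] using h)]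

theorem pvRepE_cons (c : Char) (t : List Char) (h : ¬ (['e','x','p'] <+: (c :: t))) :
    pvRepE (c :: t) = c :: pvRepE t := by
  rw [pvRepE, if_neg (by simpa [List.isPrefixOf_iff_prefix] using h)]

-- main loop invariant: the scanner computes repE ∘ repP of the remaining suffix
theorem pvLoopA_spec (s : List Char) : ∀ (i : Nat) (parts : List (List Char)),
    (pvLoopA s i parts).flatten = parts.flatten ++ pvRepE (pvRepP (s.drop i)) := by
  intro i parts
  induction i, parts using pvLoopA.induct s with
  | case5 i parts hge =>
    rw [pvLoopA, dif_neg hge]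
    rw [List.drop_eq_nil_of_le (by omega)]
    simp [pvRepP, pvRepE]
  | case1 i parts hlt hc ih =>
    -- standalone-'e' branch: appends 'e' = s[i]; its condition excludes 'exp' here
    rw [pvLoopA, dif_pos hlt, if_pos hc]
    have hnexp : ¬ (['e','x','p'] <+: s.drop i) := by
      rintro ⟨rest, hrest⟩
      have hlen := congrArg List.length hrest
      simp only [List.length_append, List.length_drop, List.length_cons, List.length_nil] at hlen
      have h1 : i + 1 < s.length := by omega
      have h2 : s.drop (i+1) = 'x' :: 'p' :: rest := by
        have h' := congrArg (List.drop 1) hrest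
        simpa [List.drop_drop, Nat.add_comm] using h'.symm
      have hx : s.getD (i+1) ' ' = 'x' := by
        rw [pvDropCons s (i+1) h1] at h2
        exact (List.cons_eq_cons.mp h2).1
      rcases hc.2.2 with h | h
      · omega
      · rw [hx] at h; exact absurd h (by decide)
    have hnp : ¬ (['e','x','p','('] <+: s.drop i) := fun h =>
      hnexp (List.IsPrefix.trans ⟨['('], rfl⟩ h)
    rw [ih]
    rw [pvDropCons s i hlt, pvRepP_cons _ _ (by rwa [← pvDropCons s i hlt])]
    rw [pvRepE_cons _ _ (fun h => hnexp (by
      rw [pvDropCons s i hlt]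
      exact pvRepP_prefix _ (by rwa [pvRepP_cons _ _ (by rwa [← pvDropCons s i hlt])]))) ]
    have hc1 := hc.1
    simp only [List.getD] at hc1
    simp [hc1]
  | case2 i parts hlt hc hexp hpar ih =>
    rw [pvLoopA, dif_pos hlt, if_neg hc, if_pos hexp, if_pos hpar]
    have hexp' : ['e','x','p'] <+: s.drop i := (pvExpIff s i).mp hexp
    have hp : ['e','x','p','('] <+: s.drop i := (pvParenIff s i hexp').mp hpar
    obtain ⟨rest, hrest⟩ := hp
    have hrest4 : s.drop (i+4) = rest := by
      have h' := congrArg (List.drop 4) hrest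
      simpa [List.drop_drop, Nat.add_comm] using h'.symm
    rw [ih, ← hrest, hrest4]
    simp only [List.cons_append, List.nil_append]
    rw [pvRepP, if_pos (by simp [List.isPrefixOf])]
    simp [pvRepE_e_caret]
  | case3 i parts hlt hc hexp hnpar ih =>
    rw [pvLoopA, dif_pos hlt, if_neg hc, if_pos hexp, if_neg hnpar]
    have hexp' : ['e','x','p'] <+: s.drop i := (pvExpIff s i).mp hexp
    have hnp : ¬ (['e','x','p','('] <+: s.drop i) := fun h => hnpar ((pvParenIff s i hexp').mpr h)
    obtain ⟨rest, hrest⟩ := hexp'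
    have hrest3 : s.drop (i+3) = rest := by
      have h' := congrArg (List.drop 3) hrest
      simpa [List.drop_drop, Nat.add_comm] using h'.symm
    rw [ih, ← hrest, hrest3]
    simp only [List.cons_append, List.nil_append]
    have h1 : ¬ (['e','x','p','('] <+: ('e' :: 'x' :: 'p' :: rest)) := by
      intro h; apply hnp; rw [← hrest]; exact h
    rw [pvRepP_cons _ _ h1]
    rw [pvRepP_cons 'x' ('p' :: rest) (by simp [List.cons_prefix_cons])]
    rw [pvRepP_cons 'p' rest (by simp [List.cons_prefix_cons])]
    rw [pvRepE, if_pos (by simp [List.isPrefixOf])]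
    simp
  | case4 i parts hlt hc hnexp ih =>
    rw [pvLoopA, dif_pos hlt, if_neg hc, if_neg hnexp]
    have hnexp' : ¬ (['e','x','p'] <+: s.drop i) := fun h => hnexp ((pvExpIff s i).mpr h)
    have hnp : ¬ (['e','x','p','('] <+: s.drop i) := fun h =>
      hnexp' (List.IsPrefix.trans ⟨['('], rfl⟩ h)
    rw [ih]
    rw [pvDropCons s i hlt, pvRepP_cons _ _ (by rwa [← pvDropCons s i hlt])]
    rw [pvRepE_cons _ _ (fun h => hnexp' (by
      rw [pvDropCons s i hlt]
      exact pvRepP_prefix _ (by rwa [pvRepP_cons _ _ (by rwa [← pvDropCons s i hlt])]))) ]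
    simp

theorem pvChars_eq (l : List Char) :
    (pvLoopA l 0 []).flatten
      = PySem.Chars.replace (PySem.Chars.replace l ['e','x','p','('] ['e','^']) ['e','x','p'] ['e','^'] := by
  rw [pvReplaceP, pvReplaceE]
  simpa using pvLoopA_spec l 0 []

-- ===== VERDICT (by name: the statement is the Claim_ definition above) =====
theorem get_display_function_string_spec : Claim_equal_get_display_function_string := by
  intro s _
  unfold Spec_get_display_function_string get_display_function_string get_display_function_string_alt
  apply String.toList_injective
  simp only [PySem.Str.toList_replace]
  rw [show ("exp(" : String).toList = ['e','x','p','('] from rfl,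
      show ("exp" : String).toList = ['e','x','p'] from rfl,
      show ("e^" : String).toList = ['e','^'] from rfl]
  simpa using pvChars_eq (PySem.Str.replace (PySem.Str.replace (PySem.Str.replace s "**" "^") "*" "×") "pi" "π").toList
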